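-- pv_equiv track=rewrite | github.com/Dining-together/Algorithm-study | 신태범/2.구현/외벽_점검.py | visit_check
-- ===== SOURCE A (Python) =====
-- def visit_check(friends,weak,n):
--     check,visited=True,[0 for _ in range(n)]
--     for friend in friends:
--         if(friend[0]>0):
--             for pos in range(friend[0]+1):
--                 visited[(friend[1]+n+pos)%n]=1
--         else:
--             for pos in range(0,friend[0]-1,-1):
--                 visited[(friend[1]+n+pos)%n]=1
--
--     for w in weak:
--         if(visited[w]==0):
--             return False
--
--     return True
-- ===== SOURCE B (Python) =====
-- def visit_check(friends, weak, n):
--     # For each weak point, test membership in each friend's inclusive arc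
--     # using modular distance, instead of marking a size-n visited table.
--     def covered(w):
--         for c, s in friends:
--             if c > 0:
--                 if (w - s) % n <= c:
--                     return True
--             else:
--                 if (s - w) % n <= -c:
--                     return True
--         return False
--     return all(covered(w) for w in weak)
-- ===== Notes on version B (the rewrite author's own statement) =====
-- stated objective: alternative
-- what changed: Replaces the size-n visited table (marked position-by-position over each friend's whole arc, then scanned) with a direct per-weak-point membership test of each friend's inclusive arc via modular distance; no table and no marking pass.
-- outside the precondition, e.g. on visit_check([], [-2, -5, 11], 3): A returns False, B returns False
import Mathlib
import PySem

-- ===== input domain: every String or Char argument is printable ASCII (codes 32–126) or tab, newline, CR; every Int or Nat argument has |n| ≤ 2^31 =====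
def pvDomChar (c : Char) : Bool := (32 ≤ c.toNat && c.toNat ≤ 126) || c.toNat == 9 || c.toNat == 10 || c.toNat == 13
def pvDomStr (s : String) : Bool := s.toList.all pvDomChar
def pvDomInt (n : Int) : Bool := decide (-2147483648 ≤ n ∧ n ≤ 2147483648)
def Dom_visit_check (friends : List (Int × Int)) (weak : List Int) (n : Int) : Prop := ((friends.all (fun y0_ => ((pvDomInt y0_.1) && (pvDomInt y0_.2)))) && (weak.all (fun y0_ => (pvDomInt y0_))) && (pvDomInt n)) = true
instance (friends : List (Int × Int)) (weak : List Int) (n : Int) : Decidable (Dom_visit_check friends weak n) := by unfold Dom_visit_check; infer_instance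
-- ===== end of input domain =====

-- B drops A's size-n visited table and instead tests, per weak point, membership in each
-- friend's inclusive arc by modular distance; no marking pass over the table.

-- ===== PORT A =====
def visit_check (friends : List (Int × Int)) (weak : List Int) (n : Int) : Bool :=
  let visited : List Int := (PySem.List.pyRange 0 n 1).map (fun _ => 0)
  let visited := friends.foldl (fun v f =>
    if f.1 > 0 then
      (PySem.List.pyRange 0 (f.1 + 1) 1).foldl
        (fun v pos => PySem.List.pySetD v (PySem.Int.mod (f.2 + n + pos) n) 1) v
    else
      (PySem.List.pyRange 0 (f.1 - 1) (-1)).foldl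
        (fun v pos => PySem.List.pySetD v (PySem.Int.mod (f.2 + n + pos) n) 1) v) visited
  -- 'for w in weak: if visited[w]==0: return False' then 'return True'
  weak.all (fun w => PySem.List.pyGetD visited w 0 != 0)

-- ===== PORT B =====
def visit_check_alt (friends : List (Int × Int)) (weak : List Int) (n : Int) : Bool :=
  weak.all (fun w => friends.any (fun f =>
    if f.1 > 0 then decide (PySem.Int.mod (w - f.2) n ≤ f.1)
    else decide (PySem.Int.mod (f.2 - w) n ≤ -f.1)))

-- ===== PRECONDITION & SPEC =====
-- Pre_ excludes the inputs where Python A raises: n ≤ 0 with any list nonempty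
-- (ZeroDivisionError / IndexError) and weak indices outside [-n, n) (IndexError); the
-- per-element bound is conservative: A returns False without raising when an uncovered
-- weak point precedes the first out-of-range one, and A and B agree (False) there too.
def Pre_visit_check (friends : List (Int × Int)) (weak : List Int) (n : Int) : Prop :=
  (0 < n ∨ (friends = [] ∧ weak = [])) ∧ ∀ w ∈ weak, -n ≤ w ∧ w < n
instance (friends : List (Int × Int)) (weak : List Int) (n : Int) : Decidable (Pre_visit_check friends weak n) := by unfold Pre_visit_check; infer_instance

def pvWitness_visit_check : (List (Int × Int)) × List Int × Int := ([(2, 3), (-1, 0)], [1, 4], 7)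

def Spec_visit_check (friends : List (Int × Int)) (weak : List Int) (n : Int) (out : Bool) : Prop := out = visit_check_alt friends weak n
instance (friends : List (Int × Int)) (weak : List Int) (n : Int) (out : Bool) : Decidable (Spec_visit_check friends weak n out) := by unfold Spec_visit_check; infer_instance

-- ===== CLAIM (what is proved, stated in full; the proofs are below) =====
def Claim_equal_visit_check : Prop := ∀ (friends : List (Int × Int)) (weak : List Int) (n : Int), Dom_visit_check friends weak n → Pre_visit_check friends weak n → Spec_visit_check friends weak n (visit_check friends weak n)

-- ===== LEMMAS AND PROOFS =====

-- Bool-valued coverage test of B, at a canonical index j ∈ [0, n)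
def pvCover (n : Int) (f : Int × Int) (j : Int) : Bool :=
  if f.1 > 0 then decide ((j - f.2) % n ≤ f.1) else decide ((f.2 - j) % n ≤ -f.1)

lemma pv_emod_le (p n : Int) (h : 0 ≤ p) (hn : 0 < n) : p % n ≤ p := by
  have h1 : p % n = p - n * (p / n) := Int.emod_def p n
  have h2 : 0 ≤ p / n := Int.ediv_nonneg h (le_of_lt hn)
  nlinarith

lemma pv_all_congr {α : Type} (l : List α) (p q : α → Bool) (h : ∀ x ∈ l, p x = q x) :
    l.all p = l.all q := by
  induction l with
  | nil => rfl
  | cons a t ih => simp_all [List.all_cons]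

lemma pv_getD_set (xs : List Int) (i : Nat) (v : Int) (j : Nat) (d : Int) :
    (xs.set i v).getD j d = if i = j ∧ i < xs.length then v else xs.getD j d := by
  simp only [List.getD_eq_getElem?_getD, List.getElem?_set]
  split_ifs with h1 h2 h3 <;> first | (simp_all; omega) | simp_all

lemma pv_length_markfold (l : List Int) (g : Int → Int) (v : List Int) :
    (l.foldl (fun v p => PySem.List.pySetD v (g p) 1) v).length = v.length := by
  induction l generalizing v with
  | nil => rfl
  | cons a t ih => simp [List.foldl_cons, ih, PySem.List.length_pySetD]

lemma pv_getD_markfold (l : List Int) (g : Int → Int) (v : List Int) (j : Nat)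
    (hg : ∀ p ∈ l, 0 ≤ g p ∧ g p < (v.length : Int)) :
    (l.foldl (fun v p => PySem.List.pySetD v (g p) 1) v).getD j 0
      = if ∃ p ∈ l, (g p).toNat = j then 1 else v.getD j 0 := by
  induction l generalizing v with
  | nil => simp
  | cons a t ih =>
    have ha := hg a (by simp)
    have hset : PySem.List.pySetD v (g a) 1 = v.set (g a).toNat 1 :=
      PySem.List.pySetD_of_nonneg _ _ ha.1
    have hlen : (v.set (g a).toNat 1).length = v.length := by simp
    rw [List.foldl_cons, hset, ih (v.set (g a).toNat 1)
      (by intro p hp; rw [hlen]; exact hg p (by simp [hp]))]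
    rw [pv_getD_set]
    by_cases h1 : ∃ p ∈ t, (g p).toNat = j
    · simp [h1]
    · by_cases h2 : (g a).toNat = j
      · have hlt : (g a).toNat < v.length := by omega
        simp [h1, h2]
        exact fun h => absurd h (by omega)
      · have : ¬ ∃ p ∈ a :: t, (g p).toNat = j := by
          rintro ⟨p, hp, he⟩
          rcases List.mem_cons.1 hp with rfl | hp'
          · exact h2 he
          · exact h1 ⟨p, hp', he⟩
        simp [h2, this]

-- forward friend: marked range positions ↔ modular distance bound
lemma pv_fwd (n c s j : Int) (hn : 0 < n) (hj0 : 0 ≤ j) (hjn : j < n) :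
    (∃ p ∈ PySem.List.pyRange 0 (c + 1) 1, ((s + n + p) % n).toNat = j.toNat)
      ↔ (j - s) % n ≤ c := by
  constructor
  · rintro ⟨p, hp, he⟩
    rw [PySem.List.mem_pyRange_one] at hp
    have hmr : 0 ≤ (s + n + p) % n := Int.emod_nonneg _ (by omega)
    have heq : (s + n + p) % n = j := by omega
    obtain ⟨q, hq⟩ : ∃ q, j = (s + n + p) - n * q :=
      ⟨(s + n + p) / n, by rw [← heq, Int.emod_def]⟩
    have : (j - s) % n = (p + n * (1 - q)) % n := by rw [hq]; ring_nf
    rw [this, Int.add_mul_emod_self_left]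
    calc p % n ≤ p := pv_emod_le p n (by omega) hn
      _ ≤ c := by omega
  · intro h
    have hd0 : 0 ≤ (j - s) % n := Int.emod_nonneg _ (by omega)
    refine ⟨(j - s) % n, PySem.List.mem_pyRange_one.2 (by omega), ?_⟩
    obtain ⟨q, hq⟩ : ∃ q, (j - s) % n = (j - s) - n * q :=
      ⟨(j - s) / n, Int.emod_def _ _⟩
    have : (s + n + (j - s) % n) % n = (j + n * (1 - q)) % n := by rw [hq]; ring_nf
    rw [this, Int.add_mul_emod_self_left, Int.emod_eq_of_lt hj0 hjn]

-- non-positive friend: marked range positions ↔ modular distance bound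
lemma pv_bwd (n c s j : Int) (hn : 0 < n) (hj0 : 0 ≤ j) (hjn : j < n) :
    (∃ p ∈ PySem.List.pyRange 0 (c - 1) (-1), ((s + n + p) % n).toNat = j.toNat)
      ↔ (s - j) % n ≤ -c := by
  constructor
  · rintro ⟨p, hp, he⟩
    rw [PySem.List.mem_pyRange_neg_one] at hp
    have hmr : 0 ≤ (s + n + p) % n := Int.emod_nonneg _ (by omega)
    have heq : (s + n + p) % n = j := by omega
    obtain ⟨q, hq⟩ : ∃ q, j = (s + n + p) - n * q :=
      ⟨(s + n + p) / n, by rw [← heq, Int.emod_def]⟩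
    have : (s - j) % n = (-p + n * (q - 1)) % n := by rw [hq]; ring_nf
    rw [this, Int.add_mul_emod_self_left]
    calc (-p) % n ≤ -p := pv_emod_le (-p) n (by omega) hn
      _ ≤ -c := by omega
  · intro h
    have hd0 : 0 ≤ (s - j) % n := Int.emod_nonneg _ (by omega)
    refine ⟨-((s - j) % n), PySem.List.mem_pyRange_neg_one.2 (by omega), ?_⟩
    obtain ⟨q, hq⟩ : ∃ q, (s - j) % n = (s - j) - n * q :=
      ⟨(s - j) / n, Int.emod_def _ _⟩
    have : (s + n + -((s - j) % n)) % n = (j + n * (1 + q)) % n := by rw [hq]; ring_nf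
    rw [this, Int.add_mul_emod_self_left, Int.emod_eq_of_lt hj0 hjn]

-- the friends-marking fold, read at canonical index j ∈ [0, n)
lemma pv_fold (n : Int) (hn : 0 < n) (fs : List (Int × Int)) (v : List Int)
    (hv : v.length = n.toNat) (j : Int) (hj0 : 0 ≤ j) (hjn : j < n) :
    (fs.foldl (fun v f =>
      if f.1 > 0 then
        (PySem.List.pyRange 0 (f.1 + 1) 1).foldl
          (fun v pos => PySem.List.pySetD v (PySem.Int.mod (f.2 + n + pos) n) 1) v
      else
        (PySem.List.pyRange 0 (f.1 - 1) (-1)).foldl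
          (fun v pos => PySem.List.pySetD v (PySem.Int.mod (f.2 + n + pos) n) 1) v) v).getD j.toNat 0
      = if fs.any (fun f => pvCover n f j) then 1 else v.getD j.toNat 0 := by
  induction fs generalizing v with
  | nil => simp
  | cons f t ih =>
    have hmod : ∀ a : Int, PySem.Int.mod a n = a % n := fun a =>
      PySem.Int.mod_eq_emod_of_pos hn
    have hg : ∀ p : Int, 0 ≤ PySem.Int.mod (f.2 + n + p) n ∧
        PySem.Int.mod (f.2 + n + p) n < (v.length : Int) := by
      intro p
      rw [hmod, hv]
      constructor
      · exact Int.emod_nonneg _ (by omega)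
      · calc (f.2 + n + p) % n < n := Int.emod_lt_of_pos _ hn
          _ = (n.toNat : Int) := by omega
    have hstep : ∀ (l : List Int),
        ((l.foldl (fun v pos => PySem.List.pySetD v (PySem.Int.mod (f.2 + n + pos) n) 1) v).getD j.toNat 0
          = if ∃ p ∈ l, ((f.2 + n + p) % n).toNat = j.toNat then 1 else v.getD j.toNat 0)
        ∧ (l.foldl (fun v pos => PySem.List.pySetD v (PySem.Int.mod (f.2 + n + pos) n) 1) v).length = v.length := by
      intro l
      constructor
      · rw [pv_getD_markfold l _ v j.toNat (fun p _ => hg p)]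
        simp only [hmod]
      · exact pv_length_markfold l _ v
    rw [List.foldl_cons, List.any_cons]
    by_cases hf : f.1 > 0
    · rw [if_pos hf]
      rw [ih _ (by rw [(hstep _).2, hv])]
      rw [(hstep _).1, if_congr (pv_fwd n f.1 f.2 j hn hj0 hjn) rfl rfl]
      simp only [pvCover, hf]
      by_cases hc : (j - f.2) % n ≤ f.1 <;>
        by_cases ht : (t.any fun f => if f.1 > 0 then decide ((j - f.2) % n ≤ f.1) else decide ((f.2 - j) % n ≤ -f.1)) = true <;>
        simp [hc, ht]
    · rw [if_neg hf]
      rw [ih _ (by rw [(hstep _).2, hv])]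
      rw [(hstep _).1, if_congr (pv_bwd n f.1 f.2 j hn hj0 hjn) rfl rfl]
      simp only [pvCover, hf]
      by_cases hc : (f.2 - j) % n ≤ -f.1 <;>
        by_cases ht : (t.any fun f => if f.1 > 0 then decide ((j - f.2) % n ≤ f.1) else decide ((f.2 - j) % n ≤ -f.1)) = true <;>
        simp [hc, ht]

lemma pv_friends_len (n : Int) (fs : List (Int × Int)) (v : List Int) :
    (fs.foldl (fun v f =>
      if f.1 > 0 then
        (PySem.List.pyRange 0 (f.1 + 1) 1).foldl
          (fun v pos => PySem.List.pySetD v (PySem.Int.mod (f.2 + n + pos) n) 1) v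
      else
        (PySem.List.pyRange 0 (f.1 - 1) (-1)).foldl
          (fun v pos => PySem.List.pySetD v (PySem.Int.mod (f.2 + n + pos) n) 1) v) v).length
      = v.length := by
  induction fs generalizing v with
  | nil => rfl
  | cons f t ih =>
    rw [List.foldl_cons]
    by_cases hf : f.1 > 0
    · rw [if_pos hf, ih, pv_length_markfold]
    · rw [if_neg hf, ih, pv_length_markfold]

lemma pv_init_getD (n : Int) (k : Nat) :
    ((PySem.List.pyRange 0 n 1).map (fun _ => (0 : Int))).getD k 0 = 0 := by
  have h : ∀ (l : List Int), (∀ x ∈ l, x = (0 : Int)) → l.getD k 0 = 0 := by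
    intro l hl
    rw [List.getD_eq_getElem?_getD]
    cases he : l[k]? with
    | none => rfl
    | some x => exact hl x (List.mem_of_getElem? he)
  exact h _ (by simp)

-- A's weak lookup at a possibly negative index equals the canonical-index lookup
lemma pv_lookup (v : List Int) (n w : Int) (hn : 0 < n) (hv : v.length = n.toNat)
    (h1 : -n ≤ w) (h2 : w < n) :
    PySem.List.pyGetD v w 0 = v.getD (w % n).toNat 0 := by
  by_cases h0 : 0 ≤ w
  · rw [PySem.List.pyGetD_eq_getElem v 0 h0 (by rw [hv]; omega),
      Int.emod_eq_of_lt h0 h2, List.getD_eq_getElem?_getD,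
      List.getElem?_eq_getElem (by omega)]
    rfl
  · have hk : 0 < (-w).toNat := by omega
    have hk2 : (-w).toNat ≤ v.length := by omega
    have hw' : w = -(((-w).toNat : Nat) : Int) := by omega
    have hmod : w % n = w + n := by
      have h' : (w + n * 1) % n = w % n := Int.add_mul_emod_self_left w n 1
      rw [mul_one] at h'
      rw [← h', Int.emod_eq_of_lt (by omega) (by omega)]
    have hidx : v.length - (-w).toNat = (w + n).toNat := by omega
    rw [hmod]
    calc PySem.List.pyGetD v w 0
        = PySem.List.pyGetD v (-(((-w).toNat : Nat) : Int)) 0 := by conv_lhs => rw [hw']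
      _ = v[v.length - (-w).toNat] := PySem.List.pyGetD_neg_natCast v _ 0 hk hk2
      _ = v.getD (w + n).toNat 0 := by
          rw [← hidx, List.getD_eq_getElem?_getD, List.getElem?_eq_getElem (by omega)]
          rfl

-- B's per-weak test at w equals the coverage test at the canonical index w % n
lemma pv_alt_canon (fs : List (Int × Int)) (n w : Int) (hn : 0 < n) :
    (fs.any (fun f =>
      if f.1 > 0 then decide (PySem.Int.mod (w - f.2) n ≤ f.1)
      else decide (PySem.Int.mod (f.2 - w) n ≤ -f.1)))
      = fs.any (fun f => pvCover n f (w % n)) := by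
  apply List.any_congr rfl
  intro f
  obtain ⟨q, hq⟩ : ∃ q, w % n = w - n * q := ⟨w / n, Int.emod_def _ _⟩
  have h1 : (w % n - f.2) % n = (w - f.2) % n := by
    rw [hq, show w - n * q - f.2 = (w - f.2) + n * (-q) by ring, Int.add_mul_emod_self_left]
  have h2 : (f.2 - w % n) % n = (f.2 - w) % n := by
    rw [hq, show f.2 - (w - n * q) = (f.2 - w) + n * q by ring, Int.add_mul_emod_self_left]
  unfold pvCover
  rw [PySem.Int.mod_eq_emod_of_pos hn, PySem.Int.mod_eq_emod_of_pos hn, h1, h2]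

-- ===== VERDICT (by name: the statement is the Claim_ definition above) =====
theorem visit_check_spec : Claim_equal_visit_check := by
  intro friends weak n _ hpre
  unfold Spec_visit_check visit_check visit_check_alt
  obtain ⟨hn | ⟨hf, hw⟩, hweak⟩ := hpre
  · apply pv_all_congr
    intro w hwmem
    obtain ⟨hw1, hw2⟩ := hweak w hwmem
    have hj0 : 0 ≤ w % n := Int.emod_nonneg _ (by omega)
    have hjn : w % n < n := Int.emod_lt_of_pos _ hn
    have hvlen : ((PySem.List.pyRange 0 n 1).map (fun _ => (0 : Int))).length = n.toNat := by
      simp [PySem.List.length_pyRange_one]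
    have hflen := pv_friends_len n friends ((PySem.List.pyRange 0 n 1).map (fun _ => (0 : Int)))
    rw [pv_lookup _ n w hn (by rw [hflen]; exact hvlen) hw1 hw2,
      pv_fold n hn friends _ hvlen (w % n) hj0 hjn,
      pv_alt_canon friends n w hn, pv_init_getD]
    by_cases h : (friends.any fun f => pvCover n f (w % n)) = true <;> simp [h]
  · subst hf; subst hw; rfl
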